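-- pv_equiv track=rewrite | github.com/MeGotsThis/BotGotsThis | ircchannel/nidoranRed/nidoranRed.py | checkBit
-- ===== SOURCE A (Python) =====
-- def checkBit(bit, dvSet):
--     match = None
--     for dv in dvSet:
--         if match is None:
--             match = (dv & bit)
--         if (dv & bit) != match:
--             return None
--     return match
-- ===== SOURCE B (Python) =====
-- def checkBit(bit, dvSet):
--     masks = [dv & bit for dv in dvSet]
--     if not masks:
--         return None
--     if min(masks) == max(masks):
--         return masks[0]
--     return None
-- ===== Notes on version B (the rewrite author's own statement) =====
-- stated objective: alternative
-- what changed: Replaces A's element-by-element comparison against a running 'match' accumulator (with early exit) by an extremal-value test: build the list of masked values and return its first element iff min(masks) == max(masks), since all values agree exactly when the minimum equals the maximum.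
import Mathlib
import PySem

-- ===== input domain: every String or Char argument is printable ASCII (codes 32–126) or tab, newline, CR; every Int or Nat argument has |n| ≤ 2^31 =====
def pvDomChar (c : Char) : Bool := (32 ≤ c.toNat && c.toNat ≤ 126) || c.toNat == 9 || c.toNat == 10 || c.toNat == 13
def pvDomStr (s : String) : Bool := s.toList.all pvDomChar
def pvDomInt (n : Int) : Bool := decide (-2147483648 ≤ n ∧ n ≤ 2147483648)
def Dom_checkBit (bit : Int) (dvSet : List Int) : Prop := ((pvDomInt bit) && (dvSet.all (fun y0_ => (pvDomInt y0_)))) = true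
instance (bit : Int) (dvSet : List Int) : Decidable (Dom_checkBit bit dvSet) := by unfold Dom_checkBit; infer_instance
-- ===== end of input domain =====

-- B replaces A's running-accumulator comparison loop by an extremal-value test
-- (min of the masked values equals max iff they all agree); same O(n) cost, different strategy.


-- ===== PORT A =====
-- the for-loop with the running 'match' accumulator and early return
def checkBitGo (bit : Int) (dvSet : List Int) (m : Option Int) : Option Int :=
  match dvSet with
  | [] => m
  | dv :: rest =>
    let m' := if m = none then some (PySem.Int.band dv bit) else m
    if some (PySem.Int.band dv bit) ≠ m' then none else checkBitGo bit rest m'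

def checkBit (bit : Int) (dvSet : List Int) : Option Int := checkBitGo bit dvSet none

-- ===== PORT B =====
-- masks = [dv & bit for dv in dvSet]; if masks: return masks[0] if min(masks) == max(masks) else None
def checkBit_alt (bit : Int) (dvSet : List Int) : Option Int :=
  let masks := dvSet.map (fun dv => PySem.Int.band dv bit)
  match masks with
  | [] => none
  | m :: _ =>
    if PySem.List.min? masks (fun x => x) = PySem.List.max? masks (fun x => x) then some m
    else none

-- ===== PRECONDITION & SPEC =====
def Spec_checkBit (bit : Int) (dvSet : List Int) (out : Option Int) : Prop := out = checkBit_alt bit dvSet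
instance (bit : Int) (dvSet : List Int) (out : Option Int) : Decidable (Spec_checkBit bit dvSet out) := by unfold Spec_checkBit; infer_instance

-- ===== CLAIM (what is proved, stated in full; the proofs are below) =====
def Claim_equal_checkBit : Prop := ∀ (bit : Int) (dvSet : List Int), Dom_checkBit bit dvSet → Spec_checkBit bit dvSet (checkBit bit dvSet)

-- ===== LEMMAS AND PROOFS =====

-- A's loop with the accumulator already set: keeps v iff every remaining masked value is v
theorem checkBitGo_some (bit : Int) (xs : List Int) (v : Int) :
    checkBitGo bit xs (some v) = if ∀ x ∈ xs, PySem.Int.band x bit = v then some v else none := by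
  induction xs with
  | nil => simp [checkBitGo]
  | cons dv rest ih =>
    by_cases h : PySem.Int.band dv bit = v
    · simp [checkBitGo, h, ih]
    · simp [checkBitGo, h]

-- folding min (resp. max) over elements all equal to the seed keeps the seed
theorem foldl_min_const (v : Int) (l : List Int) (h : ∀ x ∈ l, x = v) :
    l.foldl min v = v := by
  induction l with
  | nil => rfl
  | cons a rest ih =>
    have ha := h a (by simp)
    simp only [List.foldl_cons, ha, min_self]
    exact ih (fun x hx => h x (by simp [hx]))

theorem foldl_max_const (v : Int) (l : List Int) (h : ∀ x ∈ l, x = v) :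
    l.foldl max v = v := by
  induction l with
  | nil => rfl
  | cons a rest ih =>
    have ha := h a (by simp)
    simp only [List.foldl_cons, ha, max_self]
    exact ih (fun x hx => h x (by simp [hx]))

theorem checkBit_spec_aux (bit : Int) (dvSet : List Int) :
    checkBit bit dvSet = checkBit_alt bit dvSet := by
  cases dvSet with
  | nil => rfl
  | cons dv rest =>
    have hA : checkBit bit (dv :: rest) =
        if ∀ x ∈ rest, PySem.Int.band x bit = PySem.Int.band dv bit then
          some (PySem.Int.band dv bit) else none := by
      simp [checkBit, checkBitGo, checkBitGo_some]
    have hmap : (dv :: rest).map (fun x => PySem.Int.band x bit) =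
        PySem.Int.band dv bit :: rest.map (fun x => PySem.Int.band x bit) := by simp
    by_cases h : ∀ x ∈ rest, PySem.Int.band x bit = PySem.Int.band dv bit
    · have ht : ∀ y ∈ rest.map (fun x => PySem.Int.band x bit), y = PySem.Int.band dv bit := by
        intro y hy
        obtain ⟨x, hx, rfl⟩ := List.mem_map.1 hy
        exact h x hx
      have hmin : PySem.List.min? ((dv :: rest).map (fun x => PySem.Int.band x bit)) (fun x => x)
          = some (PySem.Int.band dv bit) := by
        rw [hmap, PySem.List.min?_id_cons, foldl_min_const _ _ ht]
      have hmax : PySem.List.max? ((dv :: rest).map (fun x => PySem.Int.band x bit)) (fun x => x)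
          = some (PySem.Int.band dv bit) := by
        rw [hmap, PySem.List.max?_id_cons, foldl_max_const _ _ ht]
      rw [hA, if_pos h]
      unfold checkBit_alt
      simp only [List.map_cons] at hmin hmax ⊢
      simp [hmin, hmax]
    · rw [not_forall] at h
      simp only [not_forall, exists_prop] at h
      obtain ⟨x, hx, hne⟩ := h
      have hAn : checkBit bit (dv :: rest) = none := by
        rw [hA, if_neg (fun hall => hne (hall x hx))]
      rw [hAn]
      unfold checkBit_alt
      simp only [List.map_cons]
      split_ifs with hcontra
      · exfalso
        rw [PySem.List.min?_id_cons, PySem.List.max?_id_cons] at hcontra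
        have heq := Option.some.inj hcontra
        have hmin : PySem.List.min?
            (PySem.Int.band dv bit :: rest.map (fun x => PySem.Int.band x bit)) (fun x => x)
            = some ((rest.map (fun x => PySem.Int.band x bit)).foldl min (PySem.Int.band dv bit)) :=
          PySem.List.min?_id_cons _ _
        have hmax : PySem.List.max?
            (PySem.Int.band dv bit :: rest.map (fun x => PySem.Int.band x bit)) (fun x => x)
            = some ((rest.map (fun x => PySem.Int.band x bit)).foldl max (PySem.Int.band dv bit)) :=
          PySem.List.max?_id_cons _ _
        have hlo := PySem.List.min?_isMin hmin
        have hhi := PySem.List.max?_isMax hmax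
        have hxm : PySem.Int.band x bit
            ∈ PySem.Int.band dv bit :: rest.map (fun x => PySem.Int.band x bit) := by
          simp only [List.mem_cons, List.mem_map]
          right; exact ⟨x, hx, rfl⟩
        have hdm : PySem.Int.band dv bit
            ∈ PySem.Int.band dv bit :: rest.map (fun x => PySem.Int.band x bit) := by simp
        have h1 := hlo _ hxm
        have h2 := hhi _ hxm
        have h3 := hlo _ hdm
        have h4 := hhi _ hdm
        simp only at h1 h2 h3 h4
        omega
      · rfl

-- ===== VERDICT (by name: the statement is the Claim_ definition above) =====
theorem checkBit_spec : Claim_equal_checkBit := by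
  intro bit dvSet _
  exact checkBit_spec_aux bit dvSet
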